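-- pv_equiv track=rewrite | github.com/pc5401/my_BOJ | 백준/Gold/11741. Generators/Generators.py | solve
-- ===== SOURCE A (Python) =====
-- def solve(n: int, k: int, params: list[tuple[int, int, int, int]]) -> tuple[int, list[int]]:
--     max_val_list = [0] * n
--     t_max_list = [0] * n
--     cand_delta_list = [None] * n
--     t_cand_list = [None] * n
--
--     for j in range(n):
--         x0, a, b, c = params[j]
--         seen = {}
--         values = {}
--         t = 0
--         x = x0
--         while x not in seen:
--             seen[x] = t
--             if x not in values:
--                 values[x] = t
--             t += 1
--             x = (a * x + b) % c
--
--         all_vals = list(values.keys())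
--         M = max(all_vals)
--         tM = values[M]
--         second = -1
--         t_second = None
--         for v in all_vals:
--             if v < M and v > second:
--                 second = v
--                 t_second = values[v]
--         max_val_list[j] = M
--         t_max_list[j] = tM
--         if second != -1:
--             cand_delta_list[j] = M - second
--             t_cand_list[j] = t_second
--         else:
--             cand_delta_list[j] = None
--             t_cand_list[j] = None
--
--     S = sum(max_val_list)
--     chosen = t_max_list[:]
--
--     if S % k != 0:
--         return S, chosen
--
--     best_delta = None
--     best_j = -1
--     for j in range(n):
--         delta = cand_delta_list[j]
--         if delta is None:
--             continue
--         if delta % k == 0: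
--             continue
--         if best_delta is None or delta < best_delta:
--             best_delta = delta
--             best_j = j
--
--     if best_delta is None:
--         return -1, []
--     S -= best_delta
--     chosen[best_j] = t_cand_list[best_j]
--     return S, chosen
-- ===== SOURCE B (Python) =====
-- def solve(n: int, k: int, params: list[tuple[int, int, int, int]]) -> tuple[int, list[int]]:
--     # one pass per orbit: track max and second-max online; no value->time dict, no rescan
--     gens = []
--     for j in range(n):
--         x0, a, b, c = params[j]
--         seen = {x0}
--         M, tM = x0, 0
--         second, t_second = -1, None
--         t = 1
--         x = (a * x0 + b) % c
--         while x not in seen: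
--             seen.add(x)
--             if x > M:
--                 if M > second:
--                     second, t_second = M, tM
--                 M, tM = x, t
--             elif x > second:
--                 second, t_second = x, t
--             t += 1
--             x = (a * x + b) % c
--         gens.append((M, tM, second, t_second))
--
--     S = sum(g[0] for g in gens)
--     chosen = [g[1] for g in gens]
--     if S % k != 0:
--         return S, chosen
--
--     best = None
--     for j, (M, tM, second, t_second) in enumerate(gens):
--         if second == -1:
--             continue
--         delta = M - second
--         if delta % k == 0:
--             continue
--         if best is None or delta < best[0]:
--             best = (delta, j, t_second)
--     if best is None:
--         return -1, []
--     delta, bj, ts = best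
--     chosen[bj] = ts
--     return S - delta, chosen
-- ===== Notes on version B (the rewrite author's own statement) =====
-- stated objective: simpler
-- what changed: B replaces A's per-orbit first-occurrence-time dict, keys-list, max() call and separate second-max rescan by a single pass over the orbit that maintains the running maximum and second maximum (with their times) online, and replaces A's preallocated parallel index-assigned arrays by one appended list of per-generator tuples.
import Mathlib
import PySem

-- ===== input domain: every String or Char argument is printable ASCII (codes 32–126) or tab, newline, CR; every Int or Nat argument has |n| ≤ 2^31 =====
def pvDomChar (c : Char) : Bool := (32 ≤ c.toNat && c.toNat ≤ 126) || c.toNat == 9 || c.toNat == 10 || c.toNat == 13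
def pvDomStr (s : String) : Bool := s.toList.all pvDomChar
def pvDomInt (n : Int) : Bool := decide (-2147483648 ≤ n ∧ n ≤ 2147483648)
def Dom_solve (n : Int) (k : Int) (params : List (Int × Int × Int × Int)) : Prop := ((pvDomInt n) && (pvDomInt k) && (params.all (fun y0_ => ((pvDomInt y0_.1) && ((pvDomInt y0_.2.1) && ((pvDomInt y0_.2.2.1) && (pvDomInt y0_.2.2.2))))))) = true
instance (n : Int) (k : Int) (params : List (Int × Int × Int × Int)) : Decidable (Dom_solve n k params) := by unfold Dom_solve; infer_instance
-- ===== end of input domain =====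

-- B replaces A's build-a-time-dict / keys-list / max() / second-max rescan per orbit by one pass that
-- maintains the running maximum and second maximum online (objective: simpler, single-pass per orbit).

-- ===== PORT A =====
-- A's while loop: seen/values dicts, t counter, x current state; returns the `values` dict.
-- fuel = |c| + 2 bounds the number of loop-condition checks (the orbit has at most |c|+1 distinct
-- states when c ≠ 0, which Pre_solve guarantees), so the fuel never runs out on admitted inputs.
def solveOrbitA (a b c : Int) : Nat → PySem.Dict Int Int → PySem.Dict Int Int → Int → Int → PySem.Dict Int Int
  | 0, _, values, _, _ => values
  | fuel+1, seen, values, t, x =>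
    if seen.contains x then values
    else
      solveOrbitA a b c fuel (seen.insert x t)
        (if values.contains x then values else values.insert x t)
        (t + 1) (PySem.Int.mod (a * x + b) c)

-- A's post-loop code on one generator: M = max(all_vals), tM = values[M], then the second-max rescan.
-- max() raises only on an empty list, which is unreachable (the loop body runs at least once); getD 0
-- is that unreachable default.  values[M] / values[v] are hits, ported as getD _ 0.
def solvePostA (values : PySem.Dict Int Int) : Int × Int × Int × Option Int :=
  let all_vals := values.keys
  let M := (PySem.List.max? all_vals (fun v => v)).getD 0
  let tM := values.getD M 0
  let st := all_vals.foldl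
      (fun (st : Int × Option Int) v => if v < M ∧ st.1 < v then (v, some (values.getD v 0)) else st)
      (-1, none)
  (M, tM, st.1, st.2)

-- one iteration of A's `for j in range(n)` body: (M, tM, cand_delta, t_cand) for generator j
def solveGenA (p : Int × Int × Int × Int) : Int × Int × Option Int × Option Int :=
  let r := solvePostA (solveOrbitA p.2.1 p.2.2.1 p.2.2.2 (p.2.2.2.natAbs + 2)
      PySem.Dict.empty PySem.Dict.empty 0 p.1)
  if r.2.2.1 ≠ -1 then (r.1, r.2.1, some (r.1 - r.2.2.1), r.2.2.2) else (r.1, r.2.1, none, none)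

def solve (n : Int) (k : Int) (params : List (Int × Int × Int × Int)) : Int × List Int :=
  -- the four preallocated lists, assigned at index j each iteration (params[j] is in range under Pre_solve)
  let st := (PySem.List.pyRange 0 n 1).foldl
    (fun (st : List Int × List Int × List (Option Int) × List (Option Int)) j =>
      let r := solveGenA (PySem.List.pyGetD params j (0, 0, 0, 0))
      (PySem.List.pySetD st.1 j r.1, PySem.List.pySetD st.2.1 j r.2.1,
       PySem.List.pySetD st.2.2.1 j r.2.2.1, PySem.List.pySetD st.2.2.2 j r.2.2.2))
    (List.replicate n.toNat 0, List.replicate n.toNat 0,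
     List.replicate n.toNat none, List.replicate n.toNat none)
  let S := st.1.foldl (fun acc v => acc + v) 0
  let chosen := st.2.1
  if PySem.Int.mod S k ≠ 0 then (S, chosen)
  else
    let best := (PySem.List.pyRange 0 n 1).foldl
      (fun (best : Option Int × Int) j =>
        match PySem.List.pyGetD st.2.2.1 j none with
        | none => best
        | some delta =>
          if PySem.Int.mod delta k = 0 then best
          else match best.1 with
            | none => (some delta, j)
            | some bd => if delta < bd then (some delta, j) else best)
      (none, -1)
    match best.1 with
    | none => (-1, [])
    | some bd =>
      -- chosen[best_j] = t_cand_list[best_j]: always an int (never None) when reached; getD 0 unreachable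
      (S - bd, PySem.List.pySetD chosen best.2 ((PySem.List.pyGetD st.2.2.2 best.2 none).getD 0))

-- ===== PORT B =====
-- B's loop body: update running (M, tM, second, t_second) with the fresh orbit value x at time t
def solveStepB (st : Int × Int × Int × Option Int) (x t : Int) : Int × Int × Int × Option Int :=
  if st.1 < x then
    if st.2.2.1 < st.1 then (x, t, st.1, some st.2.1) else (x, t, st.2.2.1, st.2.2.2)
  else if st.2.2.1 < x then (st.1, st.2.1, x, some t)
  else st

-- B's while loop: seen set, t counter, x current state; fuel = |c| + 1 suffices (the first
-- iteration is peeled off into solveGenB, see Source B)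
def solveOrbitB (a b c : Int) : Nat → PySem.Set Int → Int → Int → (Int × Int × Int × Option Int) → Int × Int × Int × Option Int
  | 0, _, _, _, st => st
  | fuel+1, seen, t, x, st =>
    if PySem.Set.contains seen x then st
    else
      solveOrbitB a b c fuel (PySem.Set.add seen x) (t + 1) (PySem.Int.mod (a * x + b) c)
        (solveStepB st x t)

def solveGenB (p : Int × Int × Int × Int) : Int × Int × Int × Option Int :=
  solveOrbitB p.2.1 p.2.2.1 p.2.2.2 (p.2.2.2.natAbs + 1)
    (PySem.Set.add PySem.Set.empty p.1) 1
    (PySem.Int.mod (p.2.1 * p.1 + p.2.2.1) p.2.2.2) (p.1, 0, -1, none)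

def solve_alt (n : Int) (k : Int) (params : List (Int × Int × Int × Int)) : Int × List Int :=
  let gens := (PySem.List.pyRange 0 n 1).foldl
    (fun (acc : List (Int × Int × Int × Option Int)) j =>
      acc ++ [solveGenB (PySem.List.pyGetD params j (0, 0, 0, 0))]) []
  let S := gens.foldl (fun acc g => acc + g.1) 0
  let chosen := gens.map (fun g => g.2.1)
  if PySem.Int.mod S k ≠ 0 then (S, chosen)
  else
    let best := (PySem.List.enumerate gens 0).foldl
      (fun (best : Option (Int × Int × Option Int)) jg =>
        if jg.2.2.2.1 = -1 then best
        else
          let delta := jg.2.1 - jg.2.2.2.1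
          if PySem.Int.mod delta k = 0 then best
          else match best with
            | none => some (delta, jg.1, jg.2.2.2.2)
            | some b => if delta < b.1 then some (delta, jg.1, jg.2.2.2.2) else best)
      none
    match best with
    | none => (-1, [])
    | some b =>
      -- chosen[bj] = ts: ts is always an int (never None) when reached; getD 0 unreachable
      (S - b.1, PySem.List.pySetD chosen b.2.1 (b.2.2.getD 0))

-- ===== PRECONDITION & SPEC =====
-- Pre_solve = exactly the inputs where the Python A returns normally: k ≠ 0 (S % k would raise
-- ZeroDivisionError), n ≤ len(params) (params[j] would raise IndexError), and c ≠ 0 for each used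
-- generator ((a*x+b) % c would raise ZeroDivisionError).
def Pre_solve (n : Int) (k : Int) (params : List (Int × Int × Int × Int)) : Prop :=
  k ≠ 0 ∧ n ≤ (params.length : Int) ∧ ∀ p ∈ params.take n.toNat, p.2.2.2 ≠ 0
instance (n : Int) (k : Int) (params : List (Int × Int × Int × Int)) : Decidable (Pre_solve n k params) := by unfold Pre_solve; infer_instance
def pvWitness_solve : Int × Int × (List (Int × Int × Int × Int)) := (1, 2, [(0, 1, 1, 3)])

def Spec_solve (n : Int) (k : Int) (params : List (Int × Int × Int × Int)) (out : Int × List Int) : Prop := out = solve_alt n k params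
instance (n : Int) (k : Int) (params : List (Int × Int × Int × Int)) (out : Int × List Int) : Decidable (Spec_solve n k params out) := by unfold Spec_solve; infer_instance

-- ===== CLAIM (what is proved, stated in full; the proofs are below) =====
def Claim_equal_solve : Prop := ∀ (n : Int) (k : Int) (params : List (Int × Int × Int × Int)), Dom_solve n k params → Pre_solve n k params → Spec_solve n k params (solve n k params)

-- ===== LEMMAS AND PROOFS =====

-- translate B's per-generator tuple (M, tM, second, t_second) into A's (M, tM, cand_delta, t_cand)
def pvTranslate (g : Int × Int × Int × Option Int) : Int × Int × Option Int × Option Int :=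
  if g.2.2.1 ≠ -1 then (g.1, g.2.1, some (g.1 - g.2.2.1), g.2.2.2) else (g.1, g.2.1, none, none)

theorem pvTranslate_fst (g : Int × Int × Int × Option Int) : (pvTranslate g).1 = g.1 := by
  unfold pvTranslate; split_ifs <;> rfl

theorem pvTranslate_snd1 (g : Int × Int × Int × Option Int) : (pvTranslate g).2.1 = g.2.1 := by
  unfold pvTranslate; split_ifs <;> rfl

-- the scalar "second max below B" fold
theorem smax_le (B : Int) : ∀ (ks : List Int) (s0 : Int),
    s0 ≤ ks.foldl (fun s v => if v < B ∧ s < v then v else s) s0 := by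
  intro ks
  induction ks with
  | nil => intro s0; exact le_refl _
  | cons v ks ih =>
    intro s0
    simp only [List.foldl_cons]
    by_cases h : v < B ∧ s0 < v
    · rw [if_pos h]; exact le_trans (le_of_lt h.2) (ih v)
    · rw [if_neg h]; exact ih s0

theorem smax_cases (B : Int) : ∀ (ks : List Int) (s0 : Int),
    ks.foldl (fun s v => if v < B ∧ s < v then v else s) s0 = s0 ∨
    (ks.foldl (fun s v => if v < B ∧ s < v then v else s) s0 ∈ ks ∧
     ks.foldl (fun s v => if v < B ∧ s < v then v else s) s0 < B ∧
     s0 < ks.foldl (fun s v => if v < B ∧ s < v then v else s) s0) := by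
  intro ks
  induction ks with
  | nil => intro s0; exact Or.inl rfl
  | cons v ks ih =>
    intro s0
    simp only [List.foldl_cons]
    by_cases h : v < B ∧ s0 < v
    · rw [if_pos h]
      rcases ih v with h1 | h1
      · right
        refine ⟨?_, ?_, ?_⟩
        · rw [h1]; exact List.mem_cons_self ..
        · rw [h1]; exact h.1
        · rw [h1]; exact h.2
      · right; exact ⟨List.mem_cons_of_mem _ h1.1, h1.2.1, lt_trans h.2 h1.2.2⟩
    · rw [if_neg h]
      rcases ih s0 with h1 | h1
      · exact Or.inl h1
      · right; exact ⟨List.mem_cons_of_mem _ h1.1, h1.2⟩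

-- the pair fold A runs (recording values[v] alongside) is the scalar fold plus a tag
theorem scan_pair (d : PySem.Dict Int Int) (B : Int) : ∀ (ks : List Int) (s0 : Int) (t0 : Option Int),
    ks.foldl (fun (st : Int × Option Int) v =>
        if v < B ∧ st.1 < v then (v, some (d.getD v 0)) else st) (s0, t0)
    = (ks.foldl (fun s v => if v < B ∧ s < v then v else s) s0,
       if ks.foldl (fun s v => if v < B ∧ s < v then v else s) s0 = s0 then t0
       else some (d.getD (ks.foldl (fun s v => if v < B ∧ s < v then v else s) s0) 0)) := by
  intro ks
  induction ks with
  | nil => intro s0 t0; simp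
  | cons v ks ih =>
    intro s0 t0
    simp only [List.foldl_cons]
    by_cases hc : v < B ∧ s0 < v
    · rw [if_pos hc, if_pos hc, ih v (some (d.getD v 0))]
      have hle := smax_le B ks v
      have hne : ks.foldl (fun s v => if v < B ∧ s < v then v else s) v ≠ s0 := by
        have := hc.2; omega
      rw [if_neg hne]
      by_cases hmv : ks.foldl (fun s v => if v < B ∧ s < v then v else s) v = v
      · rw [if_pos hmv, hmv]
      · rw [if_neg hmv]
    · rw [if_neg hc, if_neg hc]
      exact ih s0 t0

theorem foldl_max_init : ∀ (ks : List Int) (a y : Int),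
    ks.foldl max (max a y) = max a (ks.foldl max y) := by
  intro ks
  induction ks with
  | nil => intro a y; rfl
  | cons v ks ih =>
    intro a y
    simp only [List.foldl_cons]
    rw [max_assoc a y v, ih a (max y v)]

theorem smax_all_lt (B : Int) : ∀ (ks : List Int) (s0 : Int), (∀ v ∈ ks, v < B) →
    ks.foldl (fun s v => if v < B ∧ s < v then v else s) s0 = ks.foldl max s0 := by
  intro ks
  induction ks with
  | nil => intro s0 _; rfl
  | cons v ks ih =>
    intro s0 h
    simp only [List.foldl_cons]
    have hv := h v (List.mem_cons_self ..)
    have hstep : (if v < B ∧ s0 < v then v else s0) = max s0 v := by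
      by_cases hc : v < B ∧ s0 < v
      · rw [if_pos hc]; omega
      · rw [if_neg hc]; omega
    rw [hstep, ih (max s0 v) (fun u hu => h u (List.mem_cons_of_mem _ hu))]

-- CORE: inserting a fresh value x at time t into the dict transforms A's post-processing
-- exactly the way B's online update does.
theorem post_insert (d : PySem.Dict Int Int) (x t : Int) (y : Int) (tl : List Int)
    (hk : d.keys = y :: tl) (hc : d.contains x = false) :
    solvePostA (d.insert x t) = solveStepB (solvePostA d) x t := by
  have hxmem : x ∉ d.keys := by
    simp [PySem.Dict.contains_eq_decide_mem_keys] at hc; exact hc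
  have hkeys' : (d.insert x t).keys = d.keys ++ [x] :=
    PySem.Dict.keys_insert_of_not_contains d t (by
      simp [PySem.Dict.contains_eq_decide_mem_keys, hxmem])
  have hMdef : (PySem.List.max? d.keys (fun v => v)).getD 0 = tl.foldl max y := by
    rw [hk, PySem.List.max?_id_cons]; rfl
  set M := tl.foldl max y with hMdef2
  have hMmem : M ∈ d.keys := by
    rw [hk]
    rcases PySem.List.foldl_max_mem tl y with h | h
    · rw [hMdef2, h]; exact List.mem_cons_self ..
    · exact List.mem_cons_of_mem _ h
  have hMmax : ∀ v ∈ d.keys, v ≤ M := by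
    intro v hv
    rw [hk] at hv
    rcases List.mem_cons.mp hv with h | h
    · rw [h]; exact (PySem.List.le_foldl_max tl y).1
    · exact (PySem.List.le_foldl_max tl y).2 v h
  have hM'def : (PySem.List.max? (d.keys ++ [x]) (fun v => v)).getD 0 = max M x := by
    rw [hk, List.cons_append, PySem.List.max?_id_cons]
    simp only [Option.getD_some, List.foldl_append, List.foldl_cons, List.foldl_nil]
    rfl
  have hxM : x ≠ M := fun h => hxmem (h ▸ hMmem)
  have hgetM : (d.insert x t).getD M 0 = d.getD M 0 :=
    PySem.Dict.getD_insert_of_ne d t 0 (Ne.symm hxM)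
  have hgetx : (d.insert x t).getD x 0 = t := PySem.Dict.getD_insert_self d x t 0
  have hsle : (-1 : Int) ≤ List.foldl (fun s v => if v < M ∧ s < v then v else s) (-1) d.keys :=
    smax_le M d.keys (-1)
  have hscases := smax_cases M d.keys (-1)
  simp only [solvePostA, hkeys', hMdef, hM'def]
  rw [scan_pair (d.insert x t) (max M x) (d.keys ++ [x]) (-1) none,
      scan_pair d M d.keys (-1) none]
  set s := List.foldl (fun s v => if v < M ∧ s < v then v else s) (-1) d.keys with hs
  simp only [solveStepB]
  by_cases hMx : M < x
  · rw [if_pos hMx]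
    have hmx : max M x = x := by omega
    rw [hmx, hgetx]
    have hallt : ∀ v ∈ d.keys, v < x := fun v hv => by have := hMmax v hv; omega
    have hS : List.foldl (fun s v => if v < x ∧ s < v then v else s) (-1) (d.keys ++ [x])
        = max (-1) M := by
      rw [List.foldl_append]
      simp only [List.foldl_cons, List.foldl_nil]
      rw [if_neg (fun hcon => lt_irrefl x hcon.1)]
      rw [smax_all_lt x d.keys (-1) hallt, hk]
      simp only [List.foldl_cons]
      exact foldl_max_init tl (-1) y
    rw [hS]
    by_cases hsM : s < M
    · rw [if_pos hsM]
      have hM1 : (-1 : Int) < M := by rcases hscases with h | h <;> omega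
      rw [show max (-1 : Int) M = M by omega]
      rw [if_neg (show ¬ (M = -1) by omega), hgetM]
    · rw [if_neg hsM]
      have h1 : s = -1 := by rcases hscases with h | h <;> omega
      rw [show max (-1 : Int) M = -1 by omega]
      rw [if_pos rfl, h1, if_pos rfl]
  · rw [if_neg hMx]
    have hxm : x < M := by omega
    have hmx : max M x = M := by omega
    rw [hmx, hgetM]
    have hS : List.foldl (fun s v => if v < M ∧ s < v then v else s) (-1) (d.keys ++ [x])
        = if x < M ∧ s < x then x else s := by
      rw [hs, List.foldl_append]
      simp only [List.foldl_cons, List.foldl_nil]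
    rw [hS]
    by_cases hsx : s < x
    · rw [if_pos hsx, if_pos (show x < M ∧ s < x from ⟨hxm, hsx⟩)]
      rw [if_neg (show ¬ (x = -1) by omega), hgetx]
    · rw [if_neg hsx, if_neg (show ¬ (x < M ∧ s < x) from fun h => hsx h.2)]
      by_cases hs1 : s = -1
      · rw [hs1]; simp
      · rw [if_neg hs1, if_neg hs1]
        have hsmem : s ∈ d.keys := by
          rcases hscases with h | h
          · exact absurd h hs1
          · exact h.1
        have hsne : s ≠ x := fun h => hxmem (by rw [← h]; exact hsmem)
        rw [PySem.Dict.getD_insert_of_ne d t 0 hsne]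

-- unrolling one iteration of A's orbit loop
theorem orbit_step (a b c : Int) (F : Nat) (seen values : PySem.Dict Int Int) (t x : Int)
    (hs : seen.contains x = false) (hv : values.contains x = false) :
    solveOrbitA a b c (F + 1) seen values t x
      = solveOrbitA a b c F (seen.insert x t) (values.insert x t) (t + 1)
          (PySem.Int.mod (a * x + b) c) := by
  simp [solveOrbitA, hs, hv]

-- the two orbit loops stay in lock-step: same seen keys, same t and x, related payloads
theorem orbit_rel (a b c : Int) : ∀ (F : Nat) (d : PySem.Dict Int Int) (t x : Int)
    (y : Int) (tl : List Int), d.keys = y :: tl →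
    solvePostA (solveOrbitA a b c F d d t x) = solveOrbitB a b c F d.keys t x (solvePostA d) := by
  intro F
  induction F with
  | zero => intro d t x y tl hk; rfl
  | succ F ih =>
    intro d t x y tl hk
    have hcc : PySem.Set.contains d.keys x = d.contains x := by
      simp [PySem.Set.contains, PySem.Dict.contains_eq_decide_mem_keys]
    simp only [solveOrbitA, solveOrbitB, hcc]
    by_cases hc : d.contains x
    · rw [if_pos hc, if_pos hc]
    · have hcf : d.contains x = false := by rw [Bool.not_eq_true] at hc; exact hc
      have hxmem : x ∉ d.keys := by
        simp [PySem.Dict.contains_eq_decide_mem_keys] at hcf; exact hcf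
      rw [if_neg hc, if_neg hc, if_neg hc]
      have hkeys' : (d.insert x t).keys = d.keys ++ [x] :=
        PySem.Dict.keys_insert_of_not_contains d t hcf
      have hadd : PySem.Set.add d.keys x = (d.insert x t).keys := by
        rw [hkeys']
        simp [PySem.Set.add, PySem.Set.contains, hxmem]
      rw [hadd, ← post_insert d x t y tl hk hcf]
      exact ih (d.insert x t) (t + 1) (PySem.Int.mod (a * x + b) c) y (tl ++ [x])
        (by rw [hkeys', hk]; rfl)

-- per-generator equality
theorem gen_eq (p : Int × Int × Int × Int) : solveGenA p = pvTranslate (solveGenB p) := by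
  have h0 : (PySem.Dict.empty : PySem.Dict Int Int).contains p.1 = false :=
    PySem.Dict.contains_empty p.1
  have hk0 : ((PySem.Dict.empty : PySem.Dict Int Int).insert p.1 (0 : Int)).keys = [p.1] := by
    rw [PySem.Dict.keys_insert_of_not_contains PySem.Dict.empty (0 : Int) h0,
        PySem.Dict.keys_empty]
    rfl
  have hpost0 : solvePostA ((PySem.Dict.empty : PySem.Dict Int Int).insert p.1 (0 : Int))
      = (p.1, 0, -1, none) := by
    simp only [solvePostA, hk0, PySem.List.max?_id_cons, List.foldl_nil, Option.getD_some,
      List.foldl_cons]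
    rw [if_neg (fun hcon => lt_irrefl p.1 hcon.1)]
    rw [PySem.Dict.getD_insert_self]
  have hset : PySem.Set.add PySem.Set.empty p.1
      = ((PySem.Dict.empty : PySem.Dict Int Int).insert p.1 (0 : Int)).keys := by
    rw [hk0]
    simp [PySem.Set.add, PySem.Set.empty, PySem.Set.contains]
  unfold solveGenA solveGenB
  rw [show p.2.2.2.natAbs + 2 = p.2.2.2.natAbs + 1 + 1 by omega]
  rw [orbit_step p.2.1 p.2.2.1 p.2.2.2 (p.2.2.2.natAbs + 1) PySem.Dict.empty PySem.Dict.empty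
      0 p.1 h0 h0]
  rw [orbit_rel p.2.1 p.2.2.1 p.2.2.2 (p.2.2.2.natAbs + 1)
      ((PySem.Dict.empty : PySem.Dict Int Int).insert p.1 (0 : Int)) (0 + 1)
      (PySem.Int.mod (p.2.1 * p.1 + p.2.2.1) p.2.2.2) p.1 [] hk0]
  rw [hset, hpost0]
  norm_num [pvTranslate]

-- the four parallel index-assigned lists A builds are maps over the index range
theorem set_append_len {alpha : Type} (as : List alpha) (b : alpha) (bs : List alpha) (v : alpha) :
    (as ++ b :: bs).set as.length v = as ++ v :: bs := by
  induction as with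
  | nil => rfl
  | cons a as ih => simp only [List.cons_append, List.length_cons, List.set_cons_succ, ih]

theorem set_append_len' {alpha : Type} (as : List alpha) (b : alpha) (bs : List alpha) (v : alpha)
    (nn : Nat) (h : nn = as.length) : (as ++ b :: bs).set nn v = as ++ v :: bs := by
  subst h; exact set_append_len as b bs v

theorem foldl_set4_aux (r : Int → Int × Int × Option Int × Option Int) (m : Nat) :
    ∀ (i : Nat), i ≤ m →
    (PySem.List.pyRange 0 (i : Int) 1).foldl
      (fun (st : List Int × List Int × List (Option Int) × List (Option Int)) j =>
        (PySem.List.pySetD st.1 j (r j).1, PySem.List.pySetD st.2.1 j (r j).2.1,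
         PySem.List.pySetD st.2.2.1 j (r j).2.2.1, PySem.List.pySetD st.2.2.2 j (r j).2.2.2))
      (List.replicate m 0, List.replicate m 0, List.replicate m none, List.replicate m none)
    = ((PySem.List.pyRange 0 (i : Int) 1).map (fun j => (r j).1) ++ List.replicate (m - i) 0,
       (PySem.List.pyRange 0 (i : Int) 1).map (fun j => (r j).2.1) ++ List.replicate (m - i) 0,
       (PySem.List.pyRange 0 (i : Int) 1).map (fun j => (r j).2.2.1) ++ List.replicate (m - i) none,
       (PySem.List.pyRange 0 (i : Int) 1).map (fun j => (r j).2.2.2) ++ List.replicate (m - i) none) := by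
  intro i
  induction i with
  | zero =>
    intro _
    simp only [Nat.cast_zero, PySem.List.pyRange_one_eq_nil (le_refl (0 : Int)), List.foldl_nil,
      List.map_nil, List.nil_append, Nat.sub_zero]
  | succ i ih =>
    intro hi
    have hcast : ((i + 1 : Nat) : Int) = (i : Int) + 1 := by push_cast; ring
    rw [hcast, PySem.List.pyRange_one_succ_right (by omega : (0 : Int) ≤ (i : Int))]
    rw [List.foldl_append]
    rw [ih (by omega)]
    simp only [List.foldl_cons, List.foldl_nil, List.map_append, List.map_cons, List.map_nil]
    have hsets : ∀ {alpha : Type} (f : Int → alpha) (dd : alpha) (v : alpha),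
        PySem.List.pySetD ((PySem.List.pyRange 0 (i : Int) 1).map f ++ List.replicate (m - i) dd)
          ((i : Nat) : Int) v
        = (PySem.List.pyRange 0 (i : Int) 1).map f ++ v :: List.replicate (m - (i + 1)) dd := by
      intro alpha f dd v
      rw [PySem.List.pySetD_natCast]
      rw [show m - i = (m - (i + 1)) + 1 by omega, List.replicate_succ]
      rw [set_append_len' _ dd _ v i
        (by rw [List.length_map, PySem.List.length_pyRange_one]; omega)]
    simp only [hsets]
    simp [List.append_assoc]

theorem pyRange_toNat (nv : Int) :
    PySem.List.pyRange 0 nv 1 = PySem.List.pyRange 0 ((nv.toNat : Nat) : Int) 1 := by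
  by_cases h : 0 ≤ nv
  · rw [Int.toNat_of_nonneg h]
  · rw [PySem.List.pyRange_one_eq_nil (by omega), PySem.List.pyRange_one_eq_nil (by omega)]

theorem foldl_set4 (r : Int → Int × Int × Option Int × Option Int) (m : Nat) :
    (PySem.List.pyRange 0 (m : Int) 1).foldl
      (fun (st : List Int × List Int × List (Option Int) × List (Option Int)) j =>
        (PySem.List.pySetD st.1 j (r j).1, PySem.List.pySetD st.2.1 j (r j).2.1,
         PySem.List.pySetD st.2.2.1 j (r j).2.2.1, PySem.List.pySetD st.2.2.2 j (r j).2.2.2))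
      (List.replicate m 0, List.replicate m 0, List.replicate m none, List.replicate m none)
    = ((PySem.List.pyRange 0 (m : Int) 1).map (fun j => (r j).1),
       (PySem.List.pyRange 0 (m : Int) 1).map (fun j => (r j).2.1),
       (PySem.List.pyRange 0 (m : Int) 1).map (fun j => (r j).2.2.1),
       (PySem.List.pyRange 0 (m : Int) 1).map (fun j => (r j).2.2.2)) := by
  have h := foldl_set4_aux r m m (le_refl m)
  simpa using h


-- the two selection loops walk the same data and keep related states
theorem sel_rel (k : Int) (f : Int → Int × Int × Int × Option Int) (m : Nat) :
    ∀ (l : List Int), (∀ j ∈ l, 0 ≤ j ∧ j < (m : Int)) →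
    ∀ (A : Option Int × Int) (B : Option (Int × Int × Option Int)),
    (fun (A : Option Int × Int) (B : Option (Int × Int × Option Int)) =>
      (A = (none, -1) ∧ B = none) ∨
      (∃ j, 0 ≤ j ∧ j < (m : Int) ∧ (f j).2.2.1 ≠ -1 ∧
        A = (some ((f j).1 - (f j).2.2.1), j) ∧
        B = some ((f j).1 - (f j).2.2.1, j, (f j).2.2.2))) A B →
    (fun (A : Option Int × Int) (B : Option (Int × Int × Option Int)) =>
      (A = (none, -1) ∧ B = none) ∨
      (∃ j, 0 ≤ j ∧ j < (m : Int) ∧ (f j).2.2.1 ≠ -1 ∧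
        A = (some ((f j).1 - (f j).2.2.1), j) ∧
        B = some ((f j).1 - (f j).2.2.1, j, (f j).2.2.2)))
      (List.foldl
        (fun (best : Option Int × Int) j =>
          match PySem.List.pyGetD
              (List.map (fun j => (pvTranslate (f j)).2.2.1) (PySem.List.pyRange 0 (m : Int) 1)) j none with
          | none => best
          | some delta =>
            if PySem.Int.mod delta k = 0 then best
            else match best.1 with
              | none => (some delta, j)
              | some bd => if delta < bd then (some delta, j) else best)
        A l)
      (List.foldl
        (fun (best : Option (Int × Int × Option Int)) j =>
          if (PySem.List.pyGetD (List.map f (PySem.List.pyRange 0 (m : Int) 1)) j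
              ((0 : Int), (0 : Int), (-1 : Int), (none : Option Int))).2.2.1 = -1 then best
          else
            if PySem.Int.mod ((PySem.List.pyGetD (List.map f (PySem.List.pyRange 0 (m : Int) 1)) j
                ((0 : Int), (0 : Int), (-1 : Int), (none : Option Int))).1 -
              (PySem.List.pyGetD (List.map f (PySem.List.pyRange 0 (m : Int) 1)) j
                ((0 : Int), (0 : Int), (-1 : Int), (none : Option Int))).2.2.1) k = 0 then best
            else match best with
              | none => some ((PySem.List.pyGetD (List.map f (PySem.List.pyRange 0 (m : Int) 1)) j
                  ((0 : Int), (0 : Int), (-1 : Int), (none : Option Int))).1 -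
                  (PySem.List.pyGetD (List.map f (PySem.List.pyRange 0 (m : Int) 1)) j
                    ((0 : Int), (0 : Int), (-1 : Int), (none : Option Int))).2.2.1, j,
                  (PySem.List.pyGetD (List.map f (PySem.List.pyRange 0 (m : Int) 1)) j
                    ((0 : Int), (0 : Int), (-1 : Int), (none : Option Int))).2.2.2)
              | some b => if (PySem.List.pyGetD (List.map f (PySem.List.pyRange 0 (m : Int) 1)) j
                  ((0 : Int), (0 : Int), (-1 : Int), (none : Option Int))).1 -
                  (PySem.List.pyGetD (List.map f (PySem.List.pyRange 0 (m : Int) 1)) j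
                    ((0 : Int), (0 : Int), (-1 : Int), (none : Option Int))).2.2.1 < b.1 then
                  some ((PySem.List.pyGetD (List.map f (PySem.List.pyRange 0 (m : Int) 1)) j
                    ((0 : Int), (0 : Int), (-1 : Int), (none : Option Int))).1 -
                    (PySem.List.pyGetD (List.map f (PySem.List.pyRange 0 (m : Int) 1)) j
                      ((0 : Int), (0 : Int), (-1 : Int), (none : Option Int))).2.2.1, j,
                    (PySem.List.pyGetD (List.map f (PySem.List.pyRange 0 (m : Int) 1)) j
                      ((0 : Int), (0 : Int), (-1 : Int), (none : Option Int))).2.2.2)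
                else best)
        B l) := by
  intro l
  induction l with
  | nil => intro _ A B hrel; exact hrel
  | cons j l ih =>
    intro hb A B hrel
    obtain ⟨hj0, hjm⟩ := hb j (List.mem_cons_self ..)
    simp only [List.foldl_cons]
    refine ih (fun u hu => hb u (List.mem_cons_of_mem _ hu)) _ _ ?_
    have hd : PySem.List.pyGetD
        (List.map (fun j => (pvTranslate (f j)).2.2.1) (PySem.List.pyRange 0 (m : Int) 1)) j none
        = (pvTranslate (f j)).2.2.1 :=
      PySem.List.pyGetD_map_pyRange_of_nonneg _ (m : Int) j none hj0 hjm
    have hg : PySem.List.pyGetD (List.map f (PySem.List.pyRange 0 (m : Int) 1)) j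
        ((0 : Int), (0 : Int), (-1 : Int), (none : Option Int)) = f j :=
      PySem.List.pyGetD_map_pyRange_of_nonneg f (m : Int) j _ hj0 hjm
    by_cases hsec : (f j).2.2.1 = -1
    · have hnone : (pvTranslate (f j)).2.2.1 = none := by
        unfold pvTranslate; rw [if_neg (not_not_intro hsec)]
      simp only [hd, hg, hnone, hsec]
      exact hrel
    · have hsome : (pvTranslate (f j)).2.2.1 = some ((f j).1 - (f j).2.2.1) := by
        unfold pvTranslate; rw [if_pos hsec]
      simp only [hd, hg, hsome, if_neg hsec]
      by_cases hmod : PySem.Int.mod ((f j).1 - (f j).2.2.1) k = 0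
      · simp only [if_pos hmod]; exact hrel
      · simp only [if_neg hmod]
        rcases hrel with ⟨hA, hB⟩ | ⟨j', hj0', hjm', hsec', hA, hB⟩
        · simp only [hA, hB]
          right; exact ⟨j, hj0, hjm, hsec, rfl, rfl⟩
        · simp only [hA, hB]
          by_cases hlt : (f j).1 - (f j).2.2.1 < (f j').1 - (f j').2.2.1
          · rw [if_pos hlt, if_pos hlt]
            right; exact ⟨j, hj0, hjm, hsec, rfl, rfl⟩
          · rw [if_neg hlt, if_neg hlt]
            right; exact ⟨j', hj0', hjm', hsec', rfl, rfl⟩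

-- the whole selection block of A equals B's
theorem sel_eq (k : Int) (f : Int → Int × Int × Int × Option Int) (m : Nat) :
    (match (List.foldl
        (fun (best : Option Int × Int) j =>
          match PySem.List.pyGetD
              (List.map (fun j => (pvTranslate (f j)).2.2.1) (PySem.List.pyRange 0 (m : Int) 1)) j none with
          | none => best
          | some delta =>
            if PySem.Int.mod delta k = 0 then best
            else match best.1 with
              | none => (some delta, j)
              | some bd => if delta < bd then (some delta, j) else best)
        (none, -1) (PySem.List.pyRange 0 (m : Int) 1)).1 with
      | none => ((-1 : Int), ([] : List Int))
      | some bd =>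
        (List.foldl (fun a j => a + (f j).1) 0 (PySem.List.pyRange 0 (m : Int) 1) - bd,
          PySem.List.pySetD (List.map (fun j => (f j).2.1) (PySem.List.pyRange 0 (m : Int) 1))
            (List.foldl
              (fun (best : Option Int × Int) j =>
          match PySem.List.pyGetD
              (List.map (fun j => (pvTranslate (f j)).2.2.1) (PySem.List.pyRange 0 (m : Int) 1)) j none with
          | none => best
          | some delta =>
            if PySem.Int.mod delta k = 0 then best
            else match best.1 with
              | none => (some delta, j)
              | some bd => if delta < bd then (some delta, j) else best)
              (none, -1) (PySem.List.pyRange 0 (m : Int) 1)).2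
            ((PySem.List.pyGetD
                (List.map (fun j => (pvTranslate (f j)).2.2.2) (PySem.List.pyRange 0 (m : Int) 1))
                (List.foldl
                  (fun (best : Option Int × Int) j =>
          match PySem.List.pyGetD
              (List.map (fun j => (pvTranslate (f j)).2.2.1) (PySem.List.pyRange 0 (m : Int) 1)) j none with
          | none => best
          | some delta =>
            if PySem.Int.mod delta k = 0 then best
            else match best.1 with
              | none => (some delta, j)
              | some bd => if delta < bd then (some delta, j) else best)
                  (none, -1) (PySem.List.pyRange 0 (m : Int) 1)).2 none).getD 0)))
    = (match List.foldl
        (fun (best : Option (Int × Int × Option Int)) jg =>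
          if jg.2.2.2.1 = -1 then best
          else
            if PySem.Int.mod (jg.2.1 - jg.2.2.2.1) k = 0 then best
            else match best with
              | none => some (jg.2.1 - jg.2.2.2.1, jg.1, jg.2.2.2.2)
              | some b => if jg.2.1 - jg.2.2.2.1 < b.1 then
                  some (jg.2.1 - jg.2.2.2.1, jg.1, jg.2.2.2.2)
                else best)
        none (PySem.List.enumerate (List.map f (PySem.List.pyRange 0 (m : Int) 1))) with
      | none => ((-1 : Int), ([] : List Int))
      | some b =>
        (List.foldl (fun a j => a + (f j).1) 0 (PySem.List.pyRange 0 (m : Int) 1) - b.1,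
          PySem.List.pySetD (List.map (fun j => (f j).2.1) (PySem.List.pyRange 0 (m : Int) 1))
            b.2.1 (b.2.2.getD 0))) := by
  rw [PySem.List.enumerate_eq_map_pyRange (List.map f (PySem.List.pyRange 0 (m : Int) 1))
      ((0 : Int), (0 : Int), (-1 : Int), (none : Option Int))]
  have hlen : PySem.List.len (List.map f (PySem.List.pyRange 0 (m : Int) 1)) = (m : Int) := by
    simp [PySem.List.length_pyRange_one]
  rw [hlen]
  simp only [List.foldl_map]
  have hrel := sel_rel k f m (PySem.List.pyRange 0 (m : Int) 1)
    (fun j hj => PySem.List.mem_pyRange_one.mp hj) (none, -1) none (Or.inl ⟨rfl, rfl⟩)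
  rcases hrel with ⟨hA, hB⟩ | ⟨j, hj0, hjm, hsec, hA, hB⟩
  · simp only [hA, hB]
  · simp only [hA, hB]
    have htc : PySem.List.pyGetD
        (List.map (fun j => (pvTranslate (f j)).2.2.2) (PySem.List.pyRange 0 (m : Int) 1)) j none
        = (f j).2.2.2 := by
      rw [PySem.List.pyGetD_map_pyRange_of_nonneg _ (m : Int) j none hj0 hjm]
      unfold pvTranslate
      rw [if_pos hsec]
    rw [htc]

theorem solve_main_eq (n k : Int) (params : List (Int × Int × Int × Int)) :
    solve n k params = solve_alt n k params := by
  simp only [solve, solve_alt]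
  rw [pyRange_toNat n]
  generalize n.toNat = m
  simp only [foldl_set4, PySem.List.foldl_append_singleton_eq_map, List.nil_append]
  simp only [gen_eq, pvTranslate_fst, pvTranslate_snd1]
  simp only [List.foldl_map, List.map_map, Function.comp_def]
  split_ifs with h1
  · rfl
  · exact sel_eq k (fun j => solveGenB (PySem.List.pyGetD params j (0, 0, 0, 0))) m


-- ===== VERDICT (by name: the statement is the Claim_ definition above) =====
theorem solve_spec : Claim_equal_solve := by
  intro n k params _ _
  unfold Spec_solve
  exact solve_main_eq n k params
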